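-- pv_equiv track=rewrite | github.com/illmakeithappen/javeed-plugins | javeed-ordio/allocation_core/time_utils.py | time_overlap
-- ===== SOURCE A (Python) =====
-- def parse_hhmm_to_minutes(value: str | None) -> int | None:
--     """Parse HH:MM into minutes after midnight."""
--     if not value or ":" not in str(value):
--         return None
--     try:
--         hh, mm = str(value).split(":", 1)
--         h = int(hh)
--         m = int(mm)
--     except (TypeError, ValueError):
--         return None
--     if h < 0 or h > 23 or m < 0 or m > 59:
--         return None
--     return h * 60 + m
--
-- def time_overlap(start_a: str, end_a: str, start_b: str, end_b: str) -> bool: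
--     """Return True if two HH:MM time ranges overlap (supports overnight ranges)."""
--     a0 = parse_hhmm_to_minutes(start_a)
--     a1 = parse_hhmm_to_minutes(end_a)
--     b0 = parse_hhmm_to_minutes(start_b)
--     b1 = parse_hhmm_to_minutes(end_b)
--     if None in (a0, a1, b0, b1):
--         return False
--
--     def intervals(start: int, end: int) -> list[tuple[int, int]]:
--         if end > start:
--             return [(start, end)]
--         return [(start, 24 * 60), (0, end)]
--
--     for x0, x1 in intervals(a0, a1):
--         for y0, y1 in intervals(b0, b1):
--             if max(x0, y0) < min(x1, y1):
--                 return True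
--     return False
-- ===== SOURCE B (Python) =====
-- def _parse_time(s):
--     """Parse HH:MM by locating the first ':' and slicing (no split helper)."""
--     i = s.find(":")
--     if i < 0:
--         return None
--     try:
--         h = int(s[:i])
--         m = int(s[i + 1:])
--     except ValueError:
--         return None
--     if 0 <= h <= 23 and 0 <= m <= 59:
--         return h * 60 + m
--     return None
--
--
-- def time_overlap(start_a, end_a, start_b, end_b):
--     """Minute-occupancy check: the ranges overlap iff some minute of the day
--     lies in both (half-open; start >= end wraps past midnight)."""
--     vals = [_parse_time(v) for v in (start_a, end_a, start_b, end_b)]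
--     if None in vals:
--         return False
--     a0, a1, b0, b1 = vals
--
--     def covers(st, en, t):
--         return st <= t < en if st < en else (t >= st or t < en)
--
--     return any(covers(a0, a1, t) and covers(b0, b1, t) for t in range(1440))
-- ===== Notes on version B (the rewrite author's own statement) =====
-- stated objective: alternative
-- what changed: B parses HH:MM by locating the first ':' with find and slicing around it (instead of split(':',1)), collects the four parses in a list, and decides overlap by scanning the day's 1440 minutes for one covered by both half-open (possibly wrapping) ranges instead of A's nested interval-decomposition max/min comparison.
import Mathlib
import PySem

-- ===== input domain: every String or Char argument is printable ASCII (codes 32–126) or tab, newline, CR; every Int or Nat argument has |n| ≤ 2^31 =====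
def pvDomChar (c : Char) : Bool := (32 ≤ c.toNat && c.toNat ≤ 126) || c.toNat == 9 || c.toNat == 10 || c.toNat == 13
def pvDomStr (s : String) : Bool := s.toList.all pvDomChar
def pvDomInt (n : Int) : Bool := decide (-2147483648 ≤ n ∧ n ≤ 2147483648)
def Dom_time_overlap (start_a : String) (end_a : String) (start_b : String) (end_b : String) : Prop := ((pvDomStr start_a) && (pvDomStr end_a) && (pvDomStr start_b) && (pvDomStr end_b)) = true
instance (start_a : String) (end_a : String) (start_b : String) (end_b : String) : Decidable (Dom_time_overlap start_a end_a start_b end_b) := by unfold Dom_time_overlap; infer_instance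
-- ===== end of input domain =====

-- B replaces A's split-based parser by a find-and-slice parser and A's nested interval-pair
-- max/min comparison by a minute-occupancy scan of the day; alternative decomposition, not faster.

-- ===== PORT A =====
-- port of Source A's parse_hhmm_to_minutes (split(":", 1) based)
def parseHHMM (value : String) : Option Int :=
  if value = "" ∨ PySem.Str.isIn ":" value = false then none
  else
    match PySem.Str.splitMax? value ":" 1 with
    | some [hh, mm] =>
      match PySem.Int.ofStr? hh, PySem.Int.ofStr? mm with
      | some h, some m =>
        if h < 0 ∨ h > 23 ∨ m < 0 ∨ m > 59 then none else some (h * 60 + m)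
      | _, _ => none
    | _ => none

def pyIntervals (s e : Int) : List (Int × Int) :=
  if e > s then [(s, e)] else [(s, 24 * 60), (0, e)]

def time_overlap (start_a : String) (end_a : String) (start_b : String) (end_b : String) : Bool :=
  match parseHHMM start_a, parseHHMM end_a, parseHHMM start_b, parseHHMM end_b with
  | some a0, some a1, some b0, some b1 =>
      (pyIntervals a0 a1).any fun x =>
        (pyIntervals b0 b1).any fun y => decide (max x.1 y.1 < min x.2 y.2)
  | _, _, _, _ => false

-- ===== PORT B =====
-- port of Source B's _parse_time: locate the first ':' with find and slice around it
def parseTime (s : String) : Option Int :=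
  let i := PySem.Str.find s ":"
  if i < 0 then none
  else
    match PySem.Int.ofStr? (PySem.Str.slice s none (some i)),
          PySem.Int.ofStr? (PySem.Str.slice s (some (i + 1)) none) with
    | some h, some m =>
        if 0 ≤ h ∧ h ≤ 23 ∧ 0 ≤ m ∧ m ≤ 59 then some (h * 60 + m) else none
    | _, _ => none

def coversMinute (st en t : Int) : Bool :=
  if st < en then decide (st ≤ t ∧ t < en) else decide (t ≥ st ∨ t < en)

def time_overlap_alt (start_a : String) (end_a : String) (start_b : String) (end_b : String) : Bool :=
  match [parseTime start_a, parseTime end_a, parseTime start_b, parseTime end_b] with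
  | [some a0, some a1, some b0, some b1] =>
      (PySem.List.pyRange 0 1440 1).any fun t =>
        coversMinute a0 a1 t && coversMinute b0 b1 t
  | _ => false

-- ===== PRECONDITION & SPEC =====
def Spec_time_overlap (start_a : String) (end_a : String) (start_b : String) (end_b : String) (out : Bool) : Prop := out = time_overlap_alt start_a end_a start_b end_b
instance (start_a : String) (end_a : String) (start_b : String) (end_b : String) (out : Bool) : Decidable (Spec_time_overlap start_a end_a start_b end_b out) := by unfold Spec_time_overlap; infer_instance

-- ===== CLAIM (what is proved, stated in full; the proofs are below) =====
def Claim_equal_time_overlap : Prop := ∀ (start_a : String) (end_a : String) (start_b : String) (end_b : String), Dom_time_overlap start_a end_a start_b end_b → Spec_time_overlap start_a end_a start_b end_b (time_overlap start_a end_a start_b end_b)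

-- ===== LEMMAS AND PROOFS =====

-- one scanning step of splitOnMax.go past a colon-free prefix
theorem go_skip (p : List Char) : ∀ (k : Nat) (l cur : List Char) (acc : List (List Char)), ':' ∉ p →
    PySem.Chars.splitOnMax.go [':'] (p.length + k + 1) 1 (p ++ l) cur acc
      = PySem.Chars.splitOnMax.go [':'] (k + 1) 1 l (p.reverse ++ cur) acc := by
  induction p with
  | nil => intro k l cur acc _; simp
  | cons c p ih =>
    intro k l cur acc hnot
    have hc : ¬ (':' = c) := by simp at hnot; exact hnot.1
    have h1 : (c::p).length + k + 1 = (p.length + k + 1) + 1 := by simp; omega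
    rw [h1]
    conv_lhs => rw [PySem.Chars.splitOnMax.go.eq_def]
    simp [List.isPrefixOf, hc]
    rw [ih k l (c::cur) acc (by simp at hnot; tauto)]

theorem go_zero (q : List Char) (acc : List (List Char)) :
    PySem.Chars.splitOnMax.go [':'] (q.length + 1) 0 q [] acc = acc.reverse ++ [q] := by
  cases q with
  | nil => rw [PySem.Chars.splitOnMax.go.eq_def]; simp
  | cons c q => rw [PySem.Chars.splitOnMax.go.eq_def]; simp

theorem go_hit (q cur : List Char) (acc : List (List Char)) :
    PySem.Chars.splitOnMax.go [':'] (q.length + 2) 1 (':'::q) cur acc = acc.reverse ++ [cur.reverse, q] := by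
  conv_lhs => rw [PySem.Chars.splitOnMax.go.eq_def]
  simp [List.isPrefixOf, go_zero]

-- s.split(':', 1) at the first colon
theorem split_colon (p q : List Char) (hp : ':' ∉ p) :
    PySem.Chars.splitOnMax (p ++ ':'::q) [':'] 1 = [p, q] := by
  unfold PySem.Chars.splitOnMax
  simp only [if_neg (by omega : ¬ (1:Int) < 0)]
  have h1 : (p ++ ':'::q).length + 1 = p.length + (q.length + 1) + 1 := by
    rw [List.length_append, List.length_cons]
  rw [h1, (by norm_num : ((1:Int)).toNat = 1), go_skip p (q.length+1) (':'::q) [] [] hp, go_hit]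
  simp

-- a string containing ':' decomposes at its first colon, which find points to
theorem find_decomp (s : List Char) (h : [':'] <:+: s) :
    ∃ p q, s = p ++ ':'::q ∧ ':' ∉ p ∧ PySem.Chars.find s [':'] = p.length := by
  have hpos : 0 ≤ PySem.Chars.find s [':'] := (PySem.Chars.find_nonneg_iff s [':']).mpr h
  obtain ⟨hpre, hmin⟩ := PySem.Chars.find_spec hpos
  set j := (PySem.Chars.find s [':']).toNat with hj
  obtain ⟨r, hr⟩ := hpre
  have hdrop : s.drop j = ':' :: r := by simpa using hr.symm
  have hjlt : j < s.length := by
    by_contra hge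
    rw [List.drop_eq_nil_of_le (by omega)] at hdrop
    simp at hdrop
  refine ⟨s.take j, r, ?_, ?_, ?_⟩
  · rw [← hdrop, List.take_append_drop]
  · intro hmem
    obtain ⟨i, hi, hget⟩ := List.getElem_of_mem hmem
    have hilt : i < j := by
      have hlen : (List.take j s).length = min j s.length := by simp
      omega
    have hgs : s[i]'(by omega) = ':' := by
      rw [← hget, List.getElem_take]
    exact hmin i hilt ⟨s.drop (i+1), by
      rw [List.drop_eq_getElem_cons (by omega : i < s.length), hgs]; rfl⟩
  · have : (s.take j).length = j := by simp; omega
    rw [this]; omega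

-- the two parsers agree on every string
theorem parse_eq (s : String) : parseTime s = parseHHMM s := by
  unfold parseTime parseHHMM
  by_cases h : PySem.Str.isIn ":" s = true
  · have hinf : (":").toList <:+: s.toList := (PySem.Str.isIn_iff_infix ":" s).mp h
    obtain ⟨p, q, hs, hp, hfind⟩ := find_decomp s.toList (by simpa using hinf)
    have hne : ¬ (s = "") := by
      intro he
      rw [he] at hs
      simp at hs
    have hFindS : PySem.Str.find s ":" = (p.length : Int) := by
      unfold PySem.Str.find
      simpa using hfind
    have hsplit : PySem.Str.splitMax? s ":" 1 = some [String.ofList p, String.ofList q] := by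
      unfold PySem.Str.splitMax? PySem.Chars.splitMax?
      rw [show (":").toList = [':'] from rfl, hs]
      simp [split_colon p q hp]
    have hslice1 : PySem.Str.slice s none (some (p.length : Int)) = String.ofList p := by
      unfold PySem.Str.slice
      rw [show PySem.Chars.slice s.toList none (some (p.length : Int)) = PySem.List.slice s.toList none (some (p.length : Int)) from rfl,
        PySem.List.slice_to _ (by omega), hs]
      simp
    have hslice2 : PySem.Str.slice s (some ((p.length : Int) + 1)) none = String.ofList q := by
      unfold PySem.Str.slice
      rw [show PySem.Chars.slice s.toList (some ((p.length : Int) + 1)) none = PySem.List.slice s.toList (some ((p.length : Int) + 1)) none from rfl,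
        PySem.List.slice_from _ (by omega), hs]
      have : ((p.length : Int) + 1).toNat = p.length + 1 := by omega
      rw [this, show p ++ ':'::q = (p ++ [':']) ++ q by simp]
      rw [List.drop_left' (by simp)]
    simp only [hFindS, hslice1, hslice2, hsplit, if_neg (by omega : ¬ ((p.length : Int) < 0)),
      if_neg (show ¬ (s = "" ∨ PySem.Str.isIn ":" s = false) by
        rintro (he | hf)
        · exact hne he
        · rw [hf] at h; simp at h)]
    cases PySem.Int.ofStr? (String.ofList p) <;> cases PySem.Int.ofStr? (String.ofList q) <;> simp
    split_ifs <;> first | rfl | omega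
  · have hninf : ¬ (":").toList <:+: s.toList := by
      intro hc; exact h ((PySem.Str.isIn_iff_infix ":" s).mpr hc)
    have hfind : PySem.Str.find s ":" = -1 := (PySem.Str.find_eq_neg_one_iff s ":").mpr hninf
    have hfb : PySem.Str.isIn ":" s = false := by
      cases hb : PySem.Str.isIn ":" s
      · rfl
      · exact absurd hb h
    rw [hfind]
    simp only [if_pos (by omega : (-1:Int) < 0)]
    simp only [if_pos (Or.inr hfb)]

-- any successfully parsed time is a minute of the day: 0 ≤ v < 1440
theorem parseHHMM_bounds (s : String) (v : Int) (h : parseHHMM s = some v) :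
    0 ≤ v ∧ v < 1440 := by
  unfold parseHHMM at h
  split at h
  · simp at h
  · split at h
    · split at h
      · split at h
        · simp at h
        · have hv := Option.some.inj h
          omega
      all_goals simp at h
    · simp at h

-- the two overlap cores agree on in-range minute values
theorem core_eq (a0 a1 b0 b1 : Int)
    (ha0 : 0 ≤ a0 ∧ a0 < 1440) (ha1 : 0 ≤ a1 ∧ a1 < 1440)
    (hb0 : 0 ≤ b0 ∧ b0 < 1440) (hb1 : 0 ≤ b1 ∧ b1 < 1440) :
    ((pyIntervals a0 a1).any fun x =>
        (pyIntervals b0 b1).any fun y => decide (max x.1 y.1 < min x.2 y.2))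
      = ((PySem.List.pyRange 0 1440 1).any fun t =>
          coversMinute a0 a1 t && coversMinute b0 b1 t) := by
  rw [Bool.eq_iff_iff]
  simp only [List.any_eq_true, PySem.List.mem_pyRange_one, Bool.and_eq_true]
  unfold pyIntervals coversMinute
  by_cases ha : a0 < a1 <;> by_cases hb : b0 < b1 <;>
    simp [ha, hb, decide_eq_true_eq]
  · constructor
    · intro h; exact ⟨max a0 b0, by omega, by omega, by omega⟩
    · rintro ⟨t, h⟩; omega
  · constructor
    · rintro (h | h)
      · exact ⟨max a0 b0, by omega, by omega, by omega⟩
      · exact ⟨a0, by omega, by omega, by omega⟩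
    · rintro ⟨t, h⟩; omega
  · constructor
    · rintro (h | h)
      · exact ⟨max a0 b0, by omega, by omega, by omega⟩
      · exact ⟨b0, by omega, by omega, by omega⟩
    · rintro ⟨t, h⟩; omega
  · constructor
    · intro h; exact ⟨max a0 b0, by omega, by omega, by omega⟩
    · rintro ⟨t, h⟩; omega

-- ===== VERDICT (by name: the statement is the Claim_ definition above) =====
theorem time_overlap_spec : Claim_equal_time_overlap := by
  intro sa ea sb eb _
  unfold Spec_time_overlap time_overlap time_overlap_alt
  simp only [parse_eq]
  cases h1 : parseHHMM sa <;> cases h2 : parseHHMM ea <;>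
    cases h3 : parseHHMM sb <;> cases h4 : parseHHMM eb <;>
    first
    | exact core_eq _ _ _ _ (parseHHMM_bounds _ _ h1) (parseHHMM_bounds _ _ h2)
        (parseHHMM_bounds _ _ h3) (parseHHMM_bounds _ _ h4)
    | rfl
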